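-- pv_equiv track=rewrite | github.com/johanna-einsiedler/data-extraction | tests/document_parsing/parser_test.py | extract_md_tables
-- ===== SOURCE A (Python) =====
-- def extract_md_tables(md_text: str):
--     # Simple Markdown table parser (| ... | ...)
--     tables = []
--     current_table = []
--     for line in md_text.splitlines():
--         if line.strip().startswith("|") and "|" in line.strip()[1:]:
--             current_table.append(line.strip())
--         elif current_table:
--             tables.append({"caption": "", "text": " ".join(current_table)})
--             current_table = []
--     if current_table:
--         tables.append({"caption": "", "text": " ".join(current_table)})
--     return tables
-- ===== SOURCE B (Python) =====
-- def _is_table_line(line):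
--     s = line.strip()
--     return s.startswith("|") and "|" in s[1:]
--
-- def extract_md_tables(md_text: str):
--     # Run-based scan: jump over each maximal run of table lines at once;
--     # no per-line accumulator, no post-loop flush.
--     lines = md_text.splitlines()
--     n = len(lines)
--     tables = []
--     i = 0
--     while i < n:
--         if _is_table_line(lines[i]):
--             j = i
--             while j < n and _is_table_line(lines[j]):
--                 j += 1
--             tables.append({"caption": "", "text": " ".join(l.strip() for l in lines[i:j])})
--             i = j
--         else:
--             i += 1
--     return tables
-- ===== Notes on version B (the rewrite author's own statement) =====
-- stated objective: alternative
-- what changed: Replaces A's line-by-line state machine (current_table accumulator plus post-loop tail flush) with a run-based scan that locates each maximal run of table lines and emits its entry in one step.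
import Mathlib
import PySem

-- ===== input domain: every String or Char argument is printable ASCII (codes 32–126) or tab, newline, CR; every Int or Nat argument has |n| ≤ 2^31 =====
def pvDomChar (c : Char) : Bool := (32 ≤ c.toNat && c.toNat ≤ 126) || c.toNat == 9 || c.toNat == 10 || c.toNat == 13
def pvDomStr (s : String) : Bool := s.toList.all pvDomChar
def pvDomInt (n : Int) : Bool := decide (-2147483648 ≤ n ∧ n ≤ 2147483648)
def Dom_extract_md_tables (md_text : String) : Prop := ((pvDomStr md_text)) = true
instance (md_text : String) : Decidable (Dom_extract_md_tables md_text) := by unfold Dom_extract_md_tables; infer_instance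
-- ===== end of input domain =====

-- B replaces A's per-line accumulator + tail flush with a run-based scan over maximal runs of table lines; alternative decomposition, same cost.

-- ===== PORT A =====
-- line.strip().startswith("|") and "|" in line.strip()[1:]
def pvIsTableLine (line : String) : Bool :=
  PySem.Str.startswith (PySem.Str.strip line) "|" &&
    PySem.Str.isIn "|" (PySem.Str.slice (PySem.Str.strip line) (some 1) none)

-- {"caption": "", "text": " ".join(cur)}
def pvTbl (cur : List String) : List (String × String) :=
  [("caption", ""), ("text", PySem.Str.join " " cur)]

-- A's for-loop over lines with state (tables, current_table), plus the final flush
def pvGoA (lines : List String) (tables : List (List (String × String)))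
    (cur : List String) : List (List (String × String)) :=
  match lines with
  | [] => if cur ≠ [] then tables ++ [pvTbl cur] else tables
  | l :: ls =>
    if pvIsTableLine l then pvGoA ls tables (cur ++ [PySem.Str.strip l])
    else if cur ≠ [] then pvGoA ls (tables ++ [pvTbl cur]) []
    else pvGoA ls tables cur

def extract_md_tables (md_text : String) : List (List (String × String)) :=
  pvGoA (PySem.Str.splitlines md_text) [] []

-- ===== PORT B =====
-- B's run scan: at a table line, take the whole maximal run, emit one entry, resume after it
def pvGoB (lines : List String) : List (List (String × String)) :=
  match lines with
  | [] => []
  | l :: ls =>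
    if pvIsTableLine l then
      pvTbl ((l :: ls.takeWhile pvIsTableLine).map PySem.Str.strip)
        :: pvGoB (ls.dropWhile pvIsTableLine)
    else pvGoB ls
termination_by lines.length
decreasing_by
  · simpa using Nat.lt_succ_of_le (List.length_dropWhile_le _ _)
  · simp

def extract_md_tables_alt (md_text : String) : List (List (String × String)) :=
  pvGoB (PySem.Str.splitlines md_text)

-- ===== PRECONDITION & SPEC =====
def Spec_extract_md_tables (md_text : String) (out : List (List (String × String))) : Prop := out = extract_md_tables_alt md_text
instance (md_text : String) (out : List (List (String × String))) : Decidable (Spec_extract_md_tables md_text out) := by unfold Spec_extract_md_tables; infer_instance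

-- ===== CLAIM (what is proved, stated in full; the proofs are below) =====
def Claim_equal_extract_md_tables : Prop := ∀ (md_text : String), Dom_extract_md_tables md_text → Spec_extract_md_tables md_text (extract_md_tables md_text)

-- ===== LEMMAS AND PROOFS =====

-- already-emitted tables only get appended to
lemma pvGoA_append (lines : List String) (tables : List (List (String × String)))
    (cur : List String) : pvGoA lines tables cur = tables ++ pvGoA lines [] cur := by
  induction lines generalizing tables cur with
  | nil => simp [pvGoA]; split <;> simp
  | cons l ls ih =>
    simp only [pvGoA]
    split
    · rw [ih tables, ih []]
    · split
      · rw [ih (tables ++ [pvTbl _]), ih ([] ++ [pvTbl _])]; simp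
      · exact ih tables cur

-- A's state machine equals B's run scan: empty accumulator case, and the
-- invariant for a nonempty accumulator (it holds the stripped run so far)
lemma pvGoA_eq_goB (lines : List String) :
    pvGoA lines [] [] = pvGoB lines ∧
    ∀ cur, cur ≠ [] →
      pvGoA lines [] cur =
        pvTbl (cur ++ (lines.takeWhile pvIsTableLine).map PySem.Str.strip)
          :: pvGoB (lines.dropWhile pvIsTableLine) := by
  induction lines with
  | nil =>
    refine ⟨by simp [pvGoA, pvGoB], ?_⟩
    intro cur h
    simp [pvGoA, pvGoB, h]
  | cons l ls ih =>
    constructor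
    · by_cases h : pvIsTableLine l
      · rw [pvGoA, pvGoB]
        simp only [h, if_true, List.nil_append]
        rw [ih.2 [PySem.Str.strip l] (by simp)]
        simp
      · rw [pvGoA, pvGoB]
        simp only [h, Bool.false_eq_true, if_false]
        simpa using ih.1
    · intro cur hcur
      by_cases h : pvIsTableLine l
      · rw [pvGoA]
        simp only [h, if_true]
        rw [ih.2 (cur ++ [PySem.Str.strip l]) (by simp)]
        simp [h]
      · rw [pvGoA]
        simp only [h, Bool.false_eq_true, ite_false, hcur, ne_eq, not_false_iff, if_true]
        rw [pvGoA_append, ih.1]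
        conv_rhs => rw [pvGoB.eq_def]
        simp [h]

-- ===== VERDICT (by name: the statement is the Claim_ definition above) =====
theorem extract_md_tables_spec : Claim_equal_extract_md_tables := by
  intro md _
  unfold Spec_extract_md_tables extract_md_tables extract_md_tables_alt
  exact (pvGoA_eq_goB _).1
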